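-- pv_equiv track=rewrite | github.com/MrBrantCode/unitest_baseline | mut_generate/mist_train_cf/cf_9557/solution.py | find_largest_prime
-- ===== SOURCE A (Python) =====
-- import math
--
-- def find_largest_prime(numbers):
--     def is_prime(n):
--         if n <= 1:
--             return False
--         if n == 2:
--             return True
--         if n % 2 == 0:
--             return False
--         for i in range(3, int(math.sqrt(n)) + 1, 2):
--             if n % i == 0:
--                 return False
--         return True
--
--     for num in reversed(numbers):
--         if is_prime(num):
--             return num
--     return None
-- ===== SOURCE B (Python) =====
-- import math
--
-- def find_largest_prime(numbers):
--     if not numbers: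
--         return None
--     m = max(numbers)
--     if m < 2:
--         return None
--     # Sieve of Eratosthenes over 0..isqrt(m): every composite c <= isqrt(m)
--     # gets marked as a multiple p*t (p <= isqrt(c), t >= p), so the unmarked
--     # entries >= 2 are exactly the primes up to isqrt(m).
--     r = math.isqrt(m)
--     mark = bytearray(r + 1)
--     for p in range(2, math.isqrt(r) + 1):
--         for q in range(p * p, r + 1, p):
--             mark[q] = 1
--     small_primes = [p for p in range(2, r + 1) if not mark[p]]
--     # A number 2 <= n <= m is prime iff no tabulated prime p with p*p <= n divides it.
--     for num in reversed(numbers):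
--         if num >= 2 and all(num % p for p in small_primes if p * p <= num):
--             return num
--     return None
-- ===== Notes on version B (the rewrite author's own statement) =====
-- stated objective: alternative
-- what changed: B replaces A's per-element trial division by odd candidates with a staged algorithm: it computes max(numbers), tabulates the primes up to isqrt(max) with a Sieve of Eratosthenes, and then scans reversed(numbers) testing each element only against tabulated primes p with p*p <= num.
import Mathlib
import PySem

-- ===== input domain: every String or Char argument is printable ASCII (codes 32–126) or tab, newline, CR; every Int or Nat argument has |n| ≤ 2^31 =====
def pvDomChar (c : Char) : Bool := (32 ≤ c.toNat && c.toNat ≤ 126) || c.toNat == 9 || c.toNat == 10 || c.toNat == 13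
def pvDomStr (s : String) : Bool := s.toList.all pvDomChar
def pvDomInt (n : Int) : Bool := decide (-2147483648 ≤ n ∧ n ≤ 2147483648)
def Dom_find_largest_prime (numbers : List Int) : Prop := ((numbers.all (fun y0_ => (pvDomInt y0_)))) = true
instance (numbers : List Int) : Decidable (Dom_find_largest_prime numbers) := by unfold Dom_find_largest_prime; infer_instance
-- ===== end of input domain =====

-- B replaces A's per-element odd trial division by a staged algorithm: a Sieve of
-- Eratosthenes tabulates the primes up to isqrt(max(numbers)) once, and the reversed
-- scan tests each element only against tabulated primes p with p*p <= num
-- (objective: alternative; same results, a different algorithm).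

-- ===== PORT A =====
-- A's nested is_prime: n<=1 / n==2 / even check, then odd trial divisors 3,5,… up to int(math.sqrt(n)).
-- int(math.sqrt(n)) is ported as Nat.sqrt n.toNat: exact for 0 ≤ n ≤ 2^31 (the float sqrt of such n
-- cannot cross an integer boundary).
def pvIsPrimeA (n : Int) : Bool :=
  if n ≤ 1 then false
  else if n = 2 then true
  else if PySem.Int.mod n 2 = 0 then false
  else (PySem.List.pyRange 3 ((Nat.sqrt n.toNat : Int) + 1) 2).all
    (fun i => !(PySem.Int.mod n i = 0))

def find_largest_prime (numbers : List Int) : Option Int :=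
  numbers.reverse.find? pvIsPrimeA

-- ===== PORT B =====
-- bytearray sieve over 0..r marking q = p*t (t ≥ p) for every p in 2..isqrt(r); math.isqrt r = Nat.sqrt r
def pvMark (r : Nat) : Array Bool :=
  (PySem.List.pyRange 2 ((Nat.sqrt r : Int) + 1) 1).foldl
    (fun a p =>
      (PySem.List.pyRange (p * p) ((r : Int) + 1) p).foldl
        (fun a q => a.setIfInBounds q.toNat true) a)
    (Array.replicate (r + 1) false)

-- small_primes = [p for p in range(2, r+1) if not mark[p]]
def pvSmallPrimes (r : Nat) : List Int :=
  let mark := pvMark r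
  (PySem.List.pyRange 2 ((r : Int) + 1) 1).filter (fun p => !mark[p.toNat]!)

-- num >= 2 and all(num % p for p in small_primes if p * p <= num)
def pvIsPrimeB (primes : List Int) (n : Int) : Bool :=
  decide (2 ≤ n) &&
    (primes.filter (fun p => p * p ≤ n)).all (fun p => !(PySem.Int.mod n p = 0))

def find_largest_prime_alt (numbers : List Int) : Option Int :=
  if numbers = [] then none
  else
    match PySem.List.max? numbers (fun x => x) with
    | none => none  -- unreachable: numbers ≠ []
    | some m =>
      if m < 2 then none
      else
        let ps := pvSmallPrimes (Nat.sqrt m.toNat)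
        numbers.reverse.find? (pvIsPrimeB ps)

-- ===== PRECONDITION & SPEC =====
def Spec_find_largest_prime (numbers : List Int) (out : Option Int) : Prop := out = find_largest_prime_alt numbers
instance (numbers : List Int) (out : Option Int) : Decidable (Spec_find_largest_prime numbers out) := by unfold Spec_find_largest_prime; infer_instance

-- ===== CLAIM (what is proved, stated in full; the proofs are below) =====
def Claim_equal_find_largest_prime : Prop := ∀ (numbers : List Int), Dom_find_largest_prime numbers → Spec_find_largest_prime numbers (find_largest_prime numbers)

-- ===== LEMMAS AND PROOFS =====

-- "n has a divisor d with d*d ≤ n": both primality tests are decided by this predicate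
def pvHasDiv (n : Int) : Prop := ∃ d : Int, 2 ≤ d ∧ d * d ≤ n ∧ d ∣ n

theorem pv_sq_le_iff (d n : Int) (hd : 0 ≤ d) (hn : 0 ≤ n) :
    d * d ≤ n ↔ d ≤ (Nat.sqrt n.toNat : Int) := by
  obtain ⟨e, rfl⟩ := Int.eq_ofNat_of_zero_le hd
  obtain ⟨N, rfl⟩ := Int.eq_ofNat_of_zero_le hn
  simp only [Int.toNat_natCast]
  exact_mod_cast (Nat.le_sqrt (m := e) (n := N)).symm

theorem pv_getBang_setIfInBounds (xs : Array Bool) (i k : Nat) (hk : k < xs.size) :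
    (xs.setIfInBounds i true)[k]! = ((i == k) || xs[k]!) := by
  simp only [Array.getElem!_eq_getD, Array.getD_eq_getD_getElem?, Array.getElem?_setIfInBounds]
  by_cases h : i = k
  · simp [h, hk]
  · simp [h]

theorem pv_foldl_mark_size (L : List Int) (xs : Array Bool) :
    (L.foldl (fun a q => a.setIfInBounds q.toNat true) xs).size = xs.size := by
  induction L generalizing xs with
  | nil => rfl
  | cons q L ih => simp [List.foldl_cons, ih]

theorem pv_foldl_mark_get (L : List Int) (hL : ∀ q ∈ L, 0 ≤ q) (xs : Array Bool) (k : Nat)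
    (hk : k < xs.size) :
    (L.foldl (fun a q => a.setIfInBounds q.toNat true) xs)[k]!
      = (L.any (fun q => q == (k : Int)) || xs[k]!) := by
  induction L generalizing xs with
  | nil => simp
  | cons q L ih =>
    have hq : 0 ≤ q := hL q (by simp)
    have hrec := ih (fun x hx => hL x (by simp [hx])) (xs.setIfInBounds q.toNat true)
      (by simpa using hk)
    simp only [List.foldl_cons, List.any_cons]
    rw [hrec, pv_getBang_setIfInBounds xs q.toNat k hk]
    have hbe : (q.toNat == k) = (q == (k : Int)) := by
      rw [Bool.eq_iff_iff]; simp only [beq_iff_eq]; omega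
    rw [hbe]
    cases q == (k : Int) <;> simp

theorem pv_foldl_sieve_get (P : List Int) (hP : ∀ p ∈ P, 0 < p) (rI : Int) (xs : Array Bool)
    (k : Nat) (hk : k < xs.size) :
    (P.foldl (fun a p => (PySem.List.pyRange (p * p) rI p).foldl
      (fun a q => a.setIfInBounds q.toNat true) a) xs)[k]!
      = (P.any (fun p => (PySem.List.pyRange (p * p) rI p).any (fun q => q == (k : Int)))
          || xs[k]!) := by
  induction P generalizing xs with
  | nil => simp
  | cons p P ih =>
    have hp : 0 < p := hP p (by simp)
    have hL : ∀ q ∈ PySem.List.pyRange (p * p) rI p, 0 ≤ q := by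
      intro q hq
      obtain ⟨h1, _, _⟩ := (PySem.List.mem_pyRange_iff_of_pos hp q).mp hq
      nlinarith
    simp only [List.foldl_cons, List.any_cons]
    rw [ih (fun x hx => hP x (by simp [hx])) _ (by simpa [pv_foldl_mark_size] using hk),
      pv_foldl_mark_get _ hL xs k hk]
    cases (PySem.List.pyRange (p * p) rI p).any (fun q => q == (k : Int)) <;> simp

-- the sieve cell k (k ≤ r) is marked exactly when k has a divisor d with d*d ≤ k
theorem pv_mark_char (r k : Nat) (hk : k ≤ r) :
    (pvMark r)[k]! = true ↔ pvHasDiv (k : Int) := by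
  have hsize : k < (Array.replicate (r + 1) false).size := by
    simp only [Array.size_replicate]; omega
  have hP : ∀ p ∈ PySem.List.pyRange 2 ((Nat.sqrt r : Int) + 1) 1, 0 < p := by
    intro p hp
    have := (PySem.List.mem_pyRange_one).mp hp
    omega
  unfold pvMark
  rw [pv_foldl_sieve_get _ hP _ _ _ hsize]
  have hrep : (Array.replicate (r + 1) false)[k]! = false := by
    rw [Array.getElem!_eq_getD, Array.getD_eq_getD_getElem?]
    have h : (Array.replicate (r + 1) false)[k]? = some false := by
      rw [Array.getElem?_replicate, if_pos (by omega)]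
    simp [h]
  rw [hrep, Bool.or_false, List.any_eq_true]
  constructor
  · rintro ⟨p, hpmem, hq⟩
    rw [List.any_eq_true] at hq
    obtain ⟨q, hqmem, hqk⟩ := hq
    rw [beq_iff_eq] at hqk
    subst hqk
    have hp2 : 2 ≤ p := ((PySem.List.mem_pyRange_one).mp hpmem).1
    obtain ⟨hge, _, hdvd⟩ := (PySem.List.mem_pyRange_iff_of_pos (by omega) _).mp hqmem
    exact ⟨p, hp2, hge, by
      have : p ∣ (k : Int) - p * p + p * p := (hdvd).add (Dvd.intro p rfl)
      simpa using this⟩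
  · rintro ⟨d, hd2, hdd, hdvd⟩
    have hdr : d ≤ (Nat.sqrt r : Int) := by
      have h := (pv_sq_le_iff d (r : Int) (by omega) (by omega)).mp (by omega)
      simpa using h
    refine ⟨d, (PySem.List.mem_pyRange_one).mpr ⟨hd2, by omega⟩, ?_⟩
    rw [List.any_eq_true]
    refine ⟨(k : Int), (PySem.List.mem_pyRange_iff_of_pos (by omega) _).mpr
      ⟨hdd, by omega, ?_⟩, by simp⟩
    exact (Int.dvd_sub hdvd (Dvd.intro d rfl))

-- membership in the tabulated prime list
theorem pv_mem_smallPrimes (r : Nat) (p : Int) :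
    p ∈ pvSmallPrimes r ↔ 2 ≤ p ∧ p ≤ (r : Int) ∧ ¬ pvHasDiv p := by
  unfold pvSmallPrimes
  simp only [List.mem_filter, PySem.List.mem_pyRange_one, Bool.not_eq_eq_eq_not, Bool.not_true]
  constructor
  · rintro ⟨⟨h2, hlt⟩, hmark⟩
    refine ⟨h2, by omega, ?_⟩
    intro hdiv
    have hk : p.toNat ≤ r := by omega
    have : (pvMark r)[p.toNat]! = true := (pv_mark_char r p.toNat hk).mpr (by
      have : ((p.toNat : Nat) : Int) = p := by omega
      rwa [this])
    simp [this] at hmark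
  · rintro ⟨h2, hle, hdiv⟩
    refine ⟨⟨h2, by omega⟩, ?_⟩
    have hk : p.toNat ≤ r := by omega
    have hcast : ((p.toNat : Nat) : Int) = p := by omega
    have : ¬ ((pvMark r)[p.toNat]! = true) := by
      rw [pv_mark_char r p.toNat hk, hcast]; exact hdiv
    simpa using this

-- A's trial-division test decides pvHasDiv
theorem pv_isPrimeA_iff (n : Int) : pvIsPrimeA n = true ↔ 2 ≤ n ∧ ¬ pvHasDiv n := by
  unfold pvIsPrimeA
  by_cases h1 : n ≤ 1
  · rw [if_pos h1]
    exact iff_of_false (by simp) (by rintro ⟨hx, -⟩; omega)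
  · by_cases h2 : n = 2
    · subst h2
      rw [if_neg h1, if_pos rfl]
      refine iff_of_true rfl ⟨by omega, ?_⟩
      rintro ⟨d, hd2, hdd, -⟩
      nlinarith
    · have h3 : 3 ≤ n := by omega
      by_cases h4 : PySem.Int.mod n 2 = 0
      · have hdvd : (2 : Int) ∣ n := (PySem.Int.mod_eq_zero_iff_dvd n 2).mp h4
        rw [if_neg h1, if_neg h2, if_pos h4]
        refine iff_of_false (by simp) ?_
        rintro ⟨-, hno⟩
        exact hno ⟨2, by omega, by omega, hdvd⟩
      · have hodd : ¬ (2 : Int) ∣ n := fun h => h4 ((PySem.Int.mod_eq_zero_iff_dvd n 2).mpr h)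
        simp only [if_neg h1, if_neg h2, if_neg h4, List.all_eq_true]
        constructor
        · intro hall
          refine ⟨by omega, ?_⟩
          rintro ⟨d, hd2, hdd, hdvd⟩
          by_cases he : (2 : Int) ∣ d
          · exact hodd (dvd_trans he hdvd)
          · have hd3 : 3 ≤ d := by omega
            have hds : d ≤ (Nat.sqrt n.toNat : Int) :=
              (pv_sq_le_iff d n (by omega) (by omega)).mp hdd
            have hmem : d ∈ PySem.List.pyRange 3 ((Nat.sqrt n.toNat : Int) + 1) 2 :=
              (PySem.List.mem_pyRange_iff_of_pos (by omega) d).mpr ⟨hd3, by omega, by omega⟩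
            have := hall d hmem
            simp only [Bool.not_eq_eq_eq_not] at this
            exact absurd ((PySem.Int.mod_eq_zero_iff_dvd n d).mpr hdvd) (by simpa using this)
        · rintro ⟨-, hno⟩ i hi
          obtain ⟨hi3, hilt, _⟩ := (PySem.List.mem_pyRange_iff_of_pos (by omega) i).mp hi
          have hii : i * i ≤ n := (pv_sq_le_iff i n (by omega) (by omega)).mpr (by omega)
          have : ¬ i ∣ n := fun hd => hno ⟨i, by omega, hii, hd⟩
          simp [PySem.Int.mod_eq_zero_iff_dvd, this]

-- B's tabulated test decides pvHasDiv for every n ≤ m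
theorem pv_isPrimeB_iff (m n : Int) (hm : 2 ≤ m) (hnm : n ≤ m) :
    pvIsPrimeB (pvSmallPrimes (Nat.sqrt m.toNat)) n = true ↔ 2 ≤ n ∧ ¬ pvHasDiv n := by
  unfold pvIsPrimeB
  by_cases hn2 : 2 ≤ n
  · simp only [hn2, decide_true, Bool.true_and, List.all_eq_true, List.mem_filter,
      decide_eq_true_eq, true_and]
    constructor
    · intro hall
      rintro ⟨d, hd2, hdd, hdvd⟩
      -- pass to the least prime factor of n
      have hn0 : 0 ≤ n := by omega
      set N := n.toNat with hN
      have hNn : (N : Int) = n := by omega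
      have hdN : d.toNat ∣ N := by
        have : d ∣ (N : Int) := by rwa [hNn]
        have h2 : (d.toNat : Int) = d := by omega
        rw [← h2] at this
        exact_mod_cast this
      have hee : d.toNat * d.toNat ≤ N := by
        have h2 : (d.toNat : Int) = d := by omega
        have : ((d.toNat * d.toNat : Nat) : Int) ≤ (N : Int) := by push_cast [h2, hNn]; omega
        exact_mod_cast this
      have hdlt : d.toNat < N := by
        have h2e : 2 ≤ d.toNat := by omega
        have : 2 * d.toNat ≤ d.toNat * d.toNat := Nat.mul_le_mul_right _ h2e
        omega
      have hNP : ¬ Nat.Prime N := by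
        intro hp
        rcases (Nat.Prime.eq_one_or_self_of_dvd hp _ hdN) with h | h <;> omega
      have hN1 : N ≠ 1 := by omega
      set q := N.minFac with hq
      have hqp : Nat.Prime q := Nat.minFac_prime hN1
      have hqd : q ∣ N := Nat.minFac_dvd N
      have hqq : q * q ≤ N := by
        have := Nat.minFac_sq_le_self (by omega) hNP
        simpa [pow_two] using this
      have hq2 : 2 ≤ q := hqp.two_le
      -- q is in the table
      have hqr : (q : Int) ≤ (Nat.sqrt m.toNat : Int) := by
        rw [← pv_sq_le_iff _ m (by positivity) (by omega)]
        have hNm : (N : Int) ≤ m := by omega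
        have h1 : ((q * q : Nat) : Int) ≤ (N : Int) := by exact_mod_cast hqq
        push_cast at h1
        nlinarith [h1, hNm]
      have hqnd : ¬ pvHasDiv (q : Int) := by
        rintro ⟨e, he2, hee', hedvd⟩
        have heN : e.toNat ∣ q := by
          have h2 : (e.toNat : Int) = e := by omega
          rw [← h2] at hedvd
          exact_mod_cast hedvd
        rcases (Nat.Prime.eq_one_or_self_of_dvd hqp _ heN) with h | h
        · omega
        · have : e = (q : Int) := by omega
          subst this
          nlinarith
      have hqmem : (q : Int) ∈ pvSmallPrimes (Nat.sqrt m.toNat) :=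
        (pv_mem_smallPrimes _ _).mpr ⟨by exact_mod_cast hq2, hqr, hqnd⟩
      have hqle : (q : Int) * (q : Int) ≤ n := by
        have : ((q * q : Nat) : Int) ≤ (N : Int) := by exact_mod_cast hqq
        push_cast at this
        omega
      have hqdvdn : (q : Int) ∣ n := by
        rw [← hNn]; exact_mod_cast hqd
      have := hall (q : Int) ⟨hqmem, hqle⟩
      simp only [Bool.not_eq_eq_eq_not] at this
      exact absurd ((PySem.Int.mod_eq_zero_iff_dvd n (q : Int)).mpr hqdvdn) (by simpa using this)
    · intro hno p hp
      obtain ⟨hpmem, hpp⟩ := hp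
      obtain ⟨hp2, _, _⟩ := (pv_mem_smallPrimes _ _).mp hpmem
      have : ¬ p ∣ n := fun hd => hno ⟨p, hp2, hpp, hd⟩
      simp [PySem.Int.mod_eq_zero_iff_dvd, this]
  · simp [hn2]

theorem pv_find?_congr (l : List Int) (f g : Int → Bool) (h : ∀ x ∈ l, f x = g x) :
    l.find? f = l.find? g := by
  induction l with
  | nil => rfl
  | cons x t ih =>
    simp only [List.find?_cons, h x (by simp)]
    cases g x
    · exact ih (fun y hy => h y (by simp [hy]))
    · rfl

-- ===== VERDICT (by name: the statement is the Claim_ definition above) =====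
theorem find_largest_prime_spec : Claim_equal_find_largest_prime := by
  intro numbers _
  show find_largest_prime numbers = find_largest_prime_alt numbers
  unfold find_largest_prime find_largest_prime_alt
  by_cases hnil : numbers = []
  · simp [hnil]
  · rw [if_neg hnil]
    cases hmax : PySem.List.max? numbers (fun x => x) with
    | none => exact absurd ((PySem.List.max?_eq_none_iff _ _).mp hmax) hnil
    | some m =>
      have hmem := PySem.List.max?_mem hmax
      have hmaxle : ∀ y ∈ numbers, y ≤ m := PySem.List.max?_isMax hmax
      show List.find? pvIsPrimeA numbers.reverse
          = if m < 2 then none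
            else List.find? (pvIsPrimeB (pvSmallPrimes (Nat.sqrt m.toNat))) numbers.reverse
      by_cases hm2 : m < 2
      · rw [if_pos hm2]
        rw [List.find?_eq_none]
        intro x hx hxp
        have hxm : x ≤ m := hmaxle x (List.mem_reverse.mp hx)
        have := (pv_isPrimeA_iff x).mp hxp
        omega
      · rw [if_neg hm2]
        apply pv_find?_congr
        intro x hx
        have hxm : x ≤ m := hmaxle x (List.mem_reverse.mp hx)
        rw [Bool.eq_iff_iff, pv_isPrimeA_iff, pv_isPrimeB_iff m x (by omega) hxm]
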